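-- pv_equiv track=rewrite | github.com/amit1870/sitaramsita | utils/helper.py | verify_mobile
-- ===== SOURCE A (Python) =====
-- def verify_mobile(mobile):
--     success = True
--
--     if not mobile.isdigit():
--         success = False
--
--     elif mobile.isdigit() and len(mobile) != 10:
--         success = False
--
--     elif mobile.isdigit() and len(mobile) == 10:
--         defaulters = [i * 10 for i in '0123456789']
--         if mobile in defaulters:
--             success = False
--
--     return success
-- ===== SOURCE B (Python) =====
-- def verify_mobile(mobile):
--     return mobile.isdigit() and len(mobile) == 10 and len(set(mobile)) != 1
-- ===== Notes on version B (the rewrite author's own statement) =====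
-- stated objective: simpler
-- what changed: Replaces the if/elif chain with the ten-element defaulters table and membership scan by one short-circuit boolean expression that detects the repeated-digit case via the cardinality of the set of characters.
import Mathlib
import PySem

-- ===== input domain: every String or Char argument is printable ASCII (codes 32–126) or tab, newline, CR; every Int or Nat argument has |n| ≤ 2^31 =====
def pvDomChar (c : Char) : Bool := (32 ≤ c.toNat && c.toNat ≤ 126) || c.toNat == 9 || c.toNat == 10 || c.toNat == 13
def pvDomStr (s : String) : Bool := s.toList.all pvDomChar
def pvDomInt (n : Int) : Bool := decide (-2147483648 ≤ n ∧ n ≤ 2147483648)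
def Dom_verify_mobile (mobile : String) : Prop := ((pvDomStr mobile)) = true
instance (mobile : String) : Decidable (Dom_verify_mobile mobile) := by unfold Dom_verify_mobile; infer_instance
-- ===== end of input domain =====

-- B replaces the if/elif chain with its ten-element defaulters table and membership scan by one
-- short-circuit boolean expression testing the cardinality of the set of characters (objective: simpler).

-- ===== PORT A =====
def verify_mobile (mobile : String) : Bool :=
  let success := true
  if !(PySem.Str.strIsdigit mobile) then
    false
  else if PySem.Str.strIsdigit mobile && !(PySem.Str.len mobile == 10) then
    false
  else if PySem.Str.strIsdigit mobile && (PySem.Str.len mobile == 10) then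
    -- defaulters = [i * 10 for i in '0123456789']
    let defaulters : List String :=
      ("0123456789".toList).map (fun i => String.ofList (List.replicate 10 i))
    if defaulters.contains mobile then false else success
  else success

-- ===== PORT B =====
def verify_mobile_alt (mobile : String) : Bool :=
  PySem.Str.strIsdigit mobile
    && (PySem.Str.len mobile == 10)
    && !(PySem.Set.len (PySem.Set.ofList mobile.toList) == 1)

-- ===== PRECONDITION & SPEC =====
def Spec_verify_mobile (mobile : String) (out : Bool) : Prop := out = verify_mobile_alt mobile
instance (mobile : String) (out : Bool) : Decidable (Spec_verify_mobile mobile out) := by unfold Spec_verify_mobile; infer_instance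

-- ===== CLAIM (what is proved, stated in full; the proofs are below) =====
def Claim_equal_verify_mobile : Prop := ∀ (mobile : String), Dom_verify_mobile mobile → Spec_verify_mobile mobile (verify_mobile mobile)

-- ===== LEMMAS AND PROOFS =====

-- a digit character is one of the ten characters of '0123456789'
theorem pv_digit_mem (c : Char) (h : PySem.Chars.isdigit c = true) :
    c ∈ "0123456789".toList := by
  simp [PySem.Chars.isdigit, Char.le_def, UInt32.le_iff_toNat_le] at h
  obtain ⟨h48, h57⟩ := h
  have hd : c.toNat = 48 ∨ c.toNat = 49 ∨ c.toNat = 50 ∨ c.toNat = 51 ∨ c.toNat = 52 ∨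
      c.toNat = 53 ∨ c.toNat = 54 ∨ c.toNat = 55 ∨ c.toNat = 56 ∨ c.toNat = 57 := by omega
  have key : ∀ n : ℕ, c.toNat = n → c = Char.ofNat n := by
    intro n hn; rw [← hn]; exact (Char.ofNat_toNat c).symm
  rcases hd with h|h|h|h|h|h|h|h|h|h <;> rw [key _ h] <;> decide

theorem pv_foldl_add_replicate (c : Char) (n : ℕ) :
    List.foldl PySem.Set.add [c] (List.replicate n c) = [c] := by
  induction n with
  | zero => rfl
  | succ n ih =>
    rw [List.replicate_succ, List.foldl_cons]
    have : PySem.Set.add [c] c = [c] := by simp [PySem.Set.add]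
    rw [this, ih]

-- the character set of a nonempty constant list is the singleton
theorem pv_ofList_replicate (c : Char) (n : ℕ) (hn : n ≠ 0) :
    PySem.Set.ofList (List.replicate n c) = [c] := by
  obtain ⟨m, rfl⟩ := Nat.exists_eq_succ_of_ne_zero hn
  rw [List.replicate_succ, PySem.Set.ofList, List.foldl_cons]
  have : PySem.Set.add PySem.Set.empty c = [c] := by simp [PySem.Set.add, PySem.Set.empty]
  rw [this]
  exact pv_foldl_add_replicate c m

-- a list whose character set has one element is constant
theorem pv_const_of_len_one (l : List Char) (h : (PySem.Set.ofList l).length = 1) :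
    ∃ c, l = List.replicate l.length c := by
  obtain ⟨a, ha⟩ := List.length_eq_one_iff.mp h
  refine ⟨a, List.eq_replicate_of_mem ?_⟩
  intro b hb
  have : b ∈ PySem.Set.ofList l := (PySem.Set.mem_ofList l b).mpr hb
  rw [ha] at this
  simpa using this

-- ===== VERDICT (by name: the statement is the Claim_ definition above) =====
theorem verify_mobile_spec : Claim_equal_verify_mobile := by
  intro mobile _
  unfold Spec_verify_mobile verify_mobile verify_mobile_alt
  by_cases hd : PySem.Str.strIsdigit mobile = true
  · by_cases hl : mobile.toList.length = 10
    · have hl' : (PySem.Str.len mobile == 10) = true := by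
        rw [PySem.Str.len_eq, beq_iff_eq, hl]; rfl
      have hcore : (("0123456789".toList).map
            (fun i => String.ofList (List.replicate 10 i))).contains mobile
          = (PySem.Set.len (PySem.Set.ofList mobile.toList) == 1) := by
        by_cases hm : mobile ∈ ("0123456789".toList).map
            (fun i => String.ofList (List.replicate 10 i))
        · obtain ⟨i, hi, him⟩ := List.mem_map.mp hm
          have htl : mobile.toList = List.replicate 10 i := by
            rw [← him, String.toList_ofList]
          have hset : PySem.Set.ofList mobile.toList = [i] := by
            rw [htl]; exact pv_ofList_replicate i 10 (by norm_num)
          rw [List.contains_iff_mem.mpr hm, hset]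
          rfl
        · have hne : ¬ (PySem.Set.ofList mobile.toList).length = 1 := by
            intro h1
            obtain ⟨c, hc⟩ := pv_const_of_len_one _ h1
            rw [hl] at hc
            have hcmem : c ∈ mobile.toList := by
              rw [hc]; exact List.mem_replicate.mpr ⟨by norm_num, rfl⟩
            have hcd : PySem.Chars.isdigit c = true := by
              rw [PySem.Str.strIsdigit, PySem.Chars.strIsdigit] at hd
              exact List.all_eq_true.mp (Bool.and_elim_right hd) c hcmem
            exact hm (List.mem_map.mpr
              ⟨c, pv_digit_mem c hcd, by rw [← hc, String.ofList_toList]⟩)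
          have hctn : (("0123456789".toList).map
              (fun i => String.ofList (List.replicate 10 i))).contains mobile = false := by
            rw [Bool.eq_false_iff]
            intro hcontr
            exact hm (List.contains_iff_mem.mp hcontr)
          have hx : (PySem.Set.len (PySem.Set.ofList mobile.toList) == 1) = false := by
            rw [PySem.Set.len, beq_eq_false_iff_ne]
            intro hcontr
            exact hne (by exact_mod_cast hcontr)
          rw [hctn, hx]
      simp only [hd, hl', Bool.not_true, Bool.and_self, Bool.true_and]
      rw [if_neg (by decide), if_neg (by decide), if_pos (by decide), hcore]
      cases hX : (PySem.Set.len (PySem.Set.ofList mobile.toList) == 1) <;> simp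
    · have h10 : (PySem.Str.len mobile == 10) = false := by
        rw [PySem.Str.len_eq, beq_eq_false_iff_ne]
        intro hcontr
        exact hl (by exact_mod_cast hcontr)
      simp only [hd, h10, Bool.not_false, Bool.not_true, Bool.and_false,
        Bool.and_self]
      rw [if_neg (by decide), if_pos (by decide), Bool.false_and]
  · have hdf : PySem.Str.strIsdigit mobile = false := by
      rwa [← Bool.not_eq_true]
    simp only [hdf, Bool.not_false, Bool.false_and]
    rw [if_pos (by decide)]
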